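-- pv_equiv track=rewrite | github.com/Jordan-Leis/Microgrid-RL | data_sources/nasa_power.py | _find_header_index
-- ===== SOURCE A (Python) =====
-- from typing import Optional, List
--
-- def _find_header_index(lines: List[str]) -> int:
--     """
--     POWER CSVs include a preamble with comments and sometimes plain-text lines
--     not prefixed by '#'. Find the first line that looks like a CSV header.
--     """
--     for i, line in enumerate(lines):
--         if "," not in line:
--             continue
--         u = line.upper()
--         has_date = "DATE" in u
--         has_ymd = ("YEAR" in u or "YYYY" in u) and ("MO" in u or "MM" in u) and ("DY" in u or "DD" in u)
--         has_hour = any(tok in u for tok in ["HOUR", "HR"])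
--         if (has_date and has_hour) or (has_ymd and has_hour):
--             return i
--     # As a last resort, return the first comma line
--     for i, line in enumerate(lines):
--         if "," in line:
--             return i
--     raise ValueError("Could not find a CSV header line in NASA POWER response.")
-- ===== SOURCE B (Python) =====
-- from typing import List
--
--
-- def _looks_like_header(line: str) -> bool:
--     u = line.upper()
--     has_date = "DATE" in u
--     has_ymd = ("YEAR" in u or "YYYY" in u) and ("MO" in u or "MM" in u) and ("DY" in u or "DD" in u)
--     has_hour = "HOUR" in u or "HR" in u
--     return (has_date and has_hour) or (has_ymd and has_hour)
--
--
-- def _find_header_index(lines: List[str]) -> int: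
--     # One pass: remember the first comma line as a fallback while still
--     # scanning for a real-looking header; return the fallback only at the end.
--     fallback = None
--     for i, line in enumerate(lines):
--         if "," not in line:
--             continue
--         if fallback is None:
--             fallback = i
--         if _looks_like_header(line):
--             return i
--     if fallback is not None:
--         return fallback
--     raise ValueError("Could not find a CSV header line in NASA POWER response.")
-- ===== Notes on version B (the rewrite author's own statement) =====
-- stated objective: simpler
-- what changed: Replaces A's two full scans (header scan, then a second scan for the first comma line) by a single pass that remembers the first comma line as a fallback and factors the header test into a helper predicate.
import Mathlib
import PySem

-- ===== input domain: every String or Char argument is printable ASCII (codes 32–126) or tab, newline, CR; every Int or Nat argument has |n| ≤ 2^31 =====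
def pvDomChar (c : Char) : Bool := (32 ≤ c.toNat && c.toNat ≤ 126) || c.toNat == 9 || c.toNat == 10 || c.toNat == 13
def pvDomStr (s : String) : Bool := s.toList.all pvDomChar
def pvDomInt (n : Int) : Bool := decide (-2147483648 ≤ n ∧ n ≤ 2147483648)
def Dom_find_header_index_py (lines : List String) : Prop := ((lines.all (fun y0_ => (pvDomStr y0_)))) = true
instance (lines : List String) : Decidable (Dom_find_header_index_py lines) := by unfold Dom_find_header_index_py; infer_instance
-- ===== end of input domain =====

-- B replaces A's two full scans by a single pass with a remembered fallback (objective: simpler).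
-- Python A raises ValueError when no line contains ','; those inputs are excluded by Pre_.

-- ===== PORT A =====
-- first loop of A: scan enumerate(lines) for a header-looking comma line
def pvLoopA1 : List (Int × String) → Option Int
  | [] => none
  | (i, line) :: rest =>
    if ¬ (PySem.Str.isIn "," line) then pvLoopA1 rest
    else
      let u := PySem.Str.upper line
      let has_date := PySem.Str.isIn "DATE" u
      let has_ymd := (PySem.Str.isIn "YEAR" u || PySem.Str.isIn "YYYY" u) &&
                     (PySem.Str.isIn "MO" u || PySem.Str.isIn "MM" u) &&
                     (PySem.Str.isIn "DY" u || PySem.Str.isIn "DD" u)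
      let has_hour := PySem.Str.isIn "HOUR" u || PySem.Str.isIn "HR" u
      if (has_date && has_hour) || (has_ymd && has_hour) then some i else pvLoopA1 rest

-- second loop of A: first comma line
def pvLoopA2 : List (Int × String) → Option Int
  | [] => none
  | (i, line) :: rest => if PySem.Str.isIn "," line then some i else pvLoopA2 rest

def find_header_index_py (lines : List String) : Int :=
  match pvLoopA1 (PySem.List.enumerate lines) with
  | some i => i
  | none =>
    match pvLoopA2 (PySem.List.enumerate lines) with
    | some i => i
    | none => 0  -- Python raises ValueError here; excluded by Pre_

-- ===== PORT B =====
def pvLooksLikeHeader (line : String) : Bool :=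
  let u := PySem.Str.upper line
  let has_date := PySem.Str.isIn "DATE" u
  let has_ymd := (PySem.Str.isIn "YEAR" u || PySem.Str.isIn "YYYY" u) &&
                 (PySem.Str.isIn "MO" u || PySem.Str.isIn "MM" u) &&
                 (PySem.Str.isIn "DY" u || PySem.Str.isIn "DD" u)
  let has_hour := PySem.Str.isIn "HOUR" u || PySem.Str.isIn "HR" u
  (has_date && has_hour) || (has_ymd && has_hour)

-- B's single pass, threading the fallback accumulator
def pvLoopB : List (Int × String) → Option Int → Int
  | [], fallback =>
    match fallback with
    | some j => j
    | none => 0  -- Python raises ValueError here; excluded by Pre_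
  | (i, line) :: rest, fallback =>
    if ¬ (PySem.Str.isIn "," line) then pvLoopB rest fallback
    else
      let fallback' := if fallback = none then some i else fallback
      if pvLooksLikeHeader line then i else pvLoopB rest fallback'

def find_header_index_py_alt (lines : List String) : Int :=
  pvLoopB (PySem.List.enumerate lines) none

-- ===== PRECONDITION & SPEC =====
-- Pre_ excludes exactly the inputs where Python A raises ValueError: no line contains a comma.
def Pre_find_header_index_py (lines : List String) : Prop :=
  (lines.any (fun line => PySem.Str.isIn "," line)) = true
instance (lines : List String) : Decidable (Pre_find_header_index_py lines) := by
  unfold Pre_find_header_index_py; infer_instance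

def pvWitness_find_header_index_py : List String := ["-BEGIN-", "DATE,HR,T2M", "x"]

def Spec_find_header_index_py (lines : List String) (out : Int) : Prop :=
  out = find_header_index_py_alt lines
instance (lines : List String) (out : Int) : Decidable (Spec_find_header_index_py lines out) := by
  unfold Spec_find_header_index_py; infer_instance

-- ===== CLAIM (what is proved, stated in full; the proofs are below) =====
def Claim_equal_find_header_index_py : Prop :=
  ∀ (lines : List String), Dom_find_header_index_py lines →
    Pre_find_header_index_py lines →
    Spec_find_header_index_py lines (find_header_index_py lines)

-- ===== LEMMAS AND PROOFS =====

-- A's inline header test is definitionally B's factored predicate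
theorem pvHeader_eq (line : String) :
    ((PySem.Str.isIn "DATE" (PySem.Str.upper line) &&
        (PySem.Str.isIn "HOUR" (PySem.Str.upper line) || PySem.Str.isIn "HR" (PySem.Str.upper line))) ||
     (((PySem.Str.isIn "YEAR" (PySem.Str.upper line) || PySem.Str.isIn "YYYY" (PySem.Str.upper line)) &&
       (PySem.Str.isIn "MO" (PySem.Str.upper line) || PySem.Str.isIn "MM" (PySem.Str.upper line)) &&
       (PySem.Str.isIn "DY" (PySem.Str.upper line) || PySem.Str.isIn "DD" (PySem.Str.upper line))) &&
      (PySem.Str.isIn "HOUR" (PySem.Str.upper line) || PySem.Str.isIn "HR" (PySem.Str.upper line))))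
    = pvLooksLikeHeader line := rfl

-- main invariant: B's pass equals A's first scan, then the fallback, then A's second scan
theorem pvLoopB_eq (l : List (Int × String)) (fb : Option Int) :
    pvLoopB l fb =
      match pvLoopA1 l with
      | some i => i
      | none =>
        match fb with
        | some j => j
        | none => match pvLoopA2 l with | some i => i | none => 0 := by
  induction l generalizing fb with
  | nil => cases fb <;> rfl
  | cons p rest ih =>
    obtain ⟨i, line⟩ := p
    by_cases hc : PySem.Str.isIn "," line = true
    · simp only [PySem.Str.isIn_eq] at hc
      have hc2 : PySem.Chars.isIn [','] line.toList = true := hc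
      simp only [pvLoopB, pvLoopA1, pvLoopA2, pvHeader_eq]
      by_cases hh : pvLooksLikeHeader line = true
      · simp [hc2, hh]
      · cases fb <;> simp [hc2, hh, ih]
    · have hc' : PySem.Chars.isIn [','] line.toList = false := by simpa using hc
      simp only [pvLoopB, pvLoopA1, pvLoopA2]
      simp [hc', ih]

-- ===== VERDICT (by name: the statement is the Claim_ definition above) =====
theorem find_header_index_py_spec : Claim_equal_find_header_index_py := by
  intro lines _ _
  unfold Spec_find_header_index_py find_header_index_py find_header_index_py_alt
  rw [pvLoopB_eq]
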